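-- pv_equiv track=rewrite | github.com/gkrieg/Nnessy | dynamicprogramming.py | highestprobability
-- ===== SOURCE A (Python) =====
-- def highestprobability(prxati):
--     answer = []
--     for line in prxati:
--         if line[0] >= line[1] and line[0] >= line[2]:
--             answer.append('A')
--         elif line[1] >= line[2]:
--             answer.append('B')
--         else:
--             answer.append('C')
--     return ''.join(answer)
-- ===== SOURCE B (Python) =====
-- def highestprobability(prxati):
--     # Stage 1: tournament between B and C per row -> (label, value) winners.
--     bc = [('B', line[1]) if line[1] >= line[2] else ('C', line[2]) for line in prxati]
--     # Stage 2: play A against each B/C winner (A wins ties).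
--     return ''.join('A' if line[0] >= v else lab for line, (lab, v) in zip(prxati, bc))
-- ===== Notes on version B (the rewrite author's own statement) =====
-- stated objective: alternative
-- what changed: Replaces A's single-pass three-way comparison cascade with a two-stage tournament: a first pass computes the B-vs-C winner (label and value) for every row, a second pass plays A against that winner; correct because a >= both b and c iff a >= max(b,c).
import Mathlib
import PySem

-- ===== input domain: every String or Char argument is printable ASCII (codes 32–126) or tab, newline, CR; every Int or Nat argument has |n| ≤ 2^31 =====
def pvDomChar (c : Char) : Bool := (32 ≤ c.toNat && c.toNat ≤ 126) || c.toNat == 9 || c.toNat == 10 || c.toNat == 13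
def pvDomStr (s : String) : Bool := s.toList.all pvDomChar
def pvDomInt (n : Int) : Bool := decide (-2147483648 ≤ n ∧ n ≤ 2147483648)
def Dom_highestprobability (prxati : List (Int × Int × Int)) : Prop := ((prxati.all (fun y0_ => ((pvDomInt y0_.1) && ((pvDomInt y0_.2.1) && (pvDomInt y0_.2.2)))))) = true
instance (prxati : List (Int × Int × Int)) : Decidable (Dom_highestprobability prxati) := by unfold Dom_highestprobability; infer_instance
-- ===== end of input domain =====

-- B replaces A's comparison cascade with a two-stage tournament (B-vs-C winners pass, then A vs winner); alternative decomposition, same cost.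

-- ===== PORT A =====
def highestprobability (prxati : List (Int × Int × Int)) : String :=
  let answer := prxati.foldl (fun answer line =>
    if line.1 ≥ line.2.1 ∧ line.1 ≥ line.2.2 then answer ++ ["A"]
    else if line.2.1 ≥ line.2.2 then answer ++ ["B"]
    else answer ++ ["C"]) []
  PySem.Str.join "" answer

-- ===== PORT B =====
-- Stage 1: B-vs-C winner of a row, as (label, value)
def pvBCWinner (line : Int × Int × Int) : String × Int :=
  if line.2.1 ≥ line.2.2 then ("B", line.2.1) else ("C", line.2.2)

def highestprobability_alt (prxati : List (Int × Int × Int)) : String :=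
  let bc := prxati.map pvBCWinner
  PySem.Str.join "" ((prxati.zip bc).map (fun p =>
    if p.1.1 ≥ p.2.2 then "A" else p.2.1))

-- ===== PRECONDITION & SPEC =====
def Spec_highestprobability (prxati : List (Int × Int × Int)) (out : String) : Prop := out = highestprobability_alt prxati
instance (prxati : List (Int × Int × Int)) (out : String) : Decidable (Spec_highestprobability prxati out) := by unfold Spec_highestprobability; infer_instance

-- ===== CLAIM (what is proved, stated in full; the proofs are below) =====
def Claim_equal_highestprobability : Prop := ∀ (prxati : List (Int × Int × Int)), Dom_highestprobability prxati → Spec_highestprobability prxati (highestprobability prxati)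

-- ===== LEMMAS AND PROOFS =====

-- A's per-row choice as a function
def pvChooseA (line : Int × Int × Int) : String :=
  if line.1 ≥ line.2.1 ∧ line.1 ≥ line.2.2 then "A"
  else if line.2.1 ≥ line.2.2 then "B" else "C"

theorem pvZipMapSelf {α β : Type} (f : α → β) (l : List α) :
    l.zip (l.map f) = l.map (fun x => (x, f x)) := by
  induction l with
  | nil => rfl
  | cons x xs ih => simpa [List.zip] using ih

theorem pvRow_eq (line : Int × Int × Int) :
    (if line.1 ≥ (pvBCWinner line).2 then "A" else (pvBCWinner line).1) = pvChooseA line := by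
  obtain ⟨a, b, c⟩ := line
  simp only [pvBCWinner, pvChooseA]
  split_ifs <;> first | rfl | omega

theorem highestprobability_spec : Claim_equal_highestprobability := by
  intro prxati _
  unfold Spec_highestprobability highestprobability highestprobability_alt
  have hbody : (fun (answer : List String) (line : Int × Int × Int) =>
      if line.1 ≥ line.2.1 ∧ line.1 ≥ line.2.2 then answer ++ ["A"]
      else if line.2.1 ≥ line.2.2 then answer ++ ["B"] else answer ++ ["C"])
      = fun acc x => acc ++ [pvChooseA x] := by
    funext acc x
    unfold pvChooseA
    split_ifs <;> rfl
  simp only [hbody, PySem.List.foldl_append_singleton_eq_map, List.nil_append,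
    pvZipMapSelf, List.map_map]
  congr 1
  exact List.map_congr_left (fun l _ => (pvRow_eq l).symm)
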